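-- pv_equiv track=rewrite | github.com/Judadego/UNIR | calculadora_promedios.py | encontrar_extremos
-- ===== SOURCE A (Python) =====
-- def encontrar_extremos(calificaciones):
--     if len(calificaciones) != 0:
--         cali_mayor = calificaciones[0]
--         cali_menor = calificaciones[0]
--         indice_mayor = 0
--         indice_menor = 0
--     else:
--         return None, None
--
--     for i,calificacion in enumerate(calificaciones):
--         if calificacion >= cali_mayor:
--             cali_mayor = calificacion
--             indice_mayor = i
--         if calificacion < cali_menor:
--             cali_menor = calificacion
--             indice_menor = i
--
--     return indice_menor, indice_mayor
-- ===== SOURCE B (Python) =====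
-- def encontrar_extremos(calificaciones):
--     if not calificaciones:
--         return None, None
--     mn = min(calificaciones)
--     mx = max(calificaciones)
--     indice_menor = calificaciones.index(mn)
--     indice_mayor = len(calificaciones) - 1 - calificaciones[::-1].index(mx)
--     return indice_menor, indice_mayor
-- ===== Notes on version B (the rewrite author's own statement) =====
-- stated objective: simpler
-- what changed: Replaces the stateful enumerate loop tracking four variables with builtin min/max plus index (first occurrence for the min, reversed-list index for the last-occurrence max).
import Mathlib
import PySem

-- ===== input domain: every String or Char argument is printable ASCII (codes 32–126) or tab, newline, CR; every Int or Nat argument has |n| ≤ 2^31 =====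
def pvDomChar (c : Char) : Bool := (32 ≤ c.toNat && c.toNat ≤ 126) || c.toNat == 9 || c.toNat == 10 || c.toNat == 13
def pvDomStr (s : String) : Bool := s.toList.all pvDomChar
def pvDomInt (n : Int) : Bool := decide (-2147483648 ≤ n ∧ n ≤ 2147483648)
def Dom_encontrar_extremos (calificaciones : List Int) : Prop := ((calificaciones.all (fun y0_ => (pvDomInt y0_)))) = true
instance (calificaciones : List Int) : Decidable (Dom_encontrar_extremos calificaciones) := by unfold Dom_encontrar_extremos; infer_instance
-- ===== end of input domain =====

-- B replaces A's four-variable enumerate loop with min/max + first-occurrence index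
-- (and reversed-list index for the last-occurrence max): simpler decomposition, same cost.


-- ===== PORT A =====
-- state: (cali_mayor, cali_menor, indice_mayor, indice_menor)
def pvStepA (s : Int × Int × Int × Int) (p : Int × Int) : Int × Int × Int × Int :=
  let s1 : Int × Int × Int × Int :=
    if s.1 ≤ p.2 then (p.2, s.2.1, p.1, s.2.2.2) else s
  if p.2 < s1.2.1 then (s1.1, p.2, s1.2.2.1, p.1) else s1

def encontrar_extremos (calificaciones : List Int) : Option Int × Option Int :=
  match calificaciones with
  | [] => (none, none)
  | c :: _ =>
    let s := (PySem.List.enumerate calificaciones 0).foldl pvStepA (c, c, 0, 0)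
    (some s.2.2.2, some s.2.2.1)

-- ===== PORT B =====
def encontrar_extremos_alt (calificaciones : List Int) : Option Int × Option Int :=
  match calificaciones with
  | [] => (none, none)
  | _ :: _ =>
    let mn := (PySem.List.min? calificaciones (fun x => x)).getD 0
    let mx := (PySem.List.max? calificaciones (fun x => x)).getD 0
    let indice_menor : Int := ((PySem.List.index? calificaciones mn).getD 0 : Nat)
    let rev := (PySem.List.slice? calificaciones none none (-1)).getD []
    let indice_mayor : Int :=
      (calificaciones.length : Int) - 1 - ((PySem.List.index? rev mx).getD 0 : Nat)
    (some indice_menor, some indice_mayor)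

-- ===== PRECONDITION & SPEC =====
def Spec_encontrar_extremos (calificaciones : List Int) (out : Option Int × Option Int) : Prop := out = encontrar_extremos_alt calificaciones
instance (calificaciones : List Int) (out : Option Int × Option Int) : Decidable (Spec_encontrar_extremos calificaciones out) := by unfold Spec_encontrar_extremos; infer_instance

-- ===== CLAIM (what is proved, stated in full; the proofs are below) =====
def Claim_equal_encontrar_extremos : Prop := ∀ (calificaciones : List Int), Dom_encontrar_extremos calificaciones → Spec_encontrar_extremos calificaciones (encontrar_extremos calificaciones)

-- ===== LEMMAS AND PROOFS =====

theorem pvStepA_eq (a b i j n y : Int) :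
    pvStepA (a, b, i, j) (n, y) =
      ((if a ≤ y then y else a), (if y < b then y else b),
       (if a ≤ y then n else i), (if y < b then n else j)) := by
  simp only [pvStepA]
  split_ifs <;> rfl

-- the invariant: the loop state is (max, min, last index of max, first index of min)
theorem pv_inv (c : Int) (t : List Int) :
    (PySem.List.enumerate (c :: t) 0).foldl pvStepA (c, c, 0, 0) =
      (t.foldl max c, t.foldl min c,
       ((c :: t).length : Int) - 1 -
         ((PySem.List.index? (c :: t).reverse (t.foldl max c)).getD 0 : Nat),
       (((PySem.List.index? (c :: t) (t.foldl min c)).getD 0 : Nat) : Int)) := by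
  induction t using List.reverseRecOn with
  | nil =>
      simp [PySem.List.enumerate_cons, PySem.List.enumerate_nil, pvStepA]
  | append_singleton s x ih =>
      have hM := PySem.List.foldl_max_mem s c
      have hm := PySem.List.foldl_min_mem s c
      have hmle := PySem.List.foldl_min_le s c
      rw [show (c :: (s ++ [x])) = ((c :: s) ++ [x]) from rfl,
          PySem.List.enumerate_append, List.foldl_append, ih]
      simp only [PySem.List.enumerate_cons, PySem.List.enumerate_nil,
        List.foldl_cons, List.foldl_nil]
      rw [pvStepA_eq]
      have hrev : (c :: s ++ [x]).reverse = x :: (c :: s).reverse := by simp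
      have hfmax : List.foldl max c (s ++ [x]) = max (List.foldl max c s) x := by
        simp [List.foldl_append]
      have hfmin : List.foldl min c (s ++ [x]) = min (List.foldl min c s) x := by
        simp [List.foldl_append]
      have hmmem : List.foldl min c s ∈ c :: s := by
        rcases hm with h | h
        · rw [h]; exact List.mem_cons_self
        · exact List.mem_cons_of_mem _ h
      have hMmem : List.foldl max c s ∈ c :: s := by
        rcases hM with h | h
        · rw [h]; exact List.mem_cons_self
        · exact List.mem_cons_of_mem _ h
      have hcM : c ≤ List.foldl max c s := (PySem.List.le_foldl_max s c).1
      by_cases hMx : s.foldl max c ≤ x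
      · by_cases hxm : x < s.foldl min c
        · exact absurd (lt_of_lt_of_le (lt_of_lt_of_le hxm hmle.1) (le_trans hcM hMx))
            (lt_irrefl x)
        · -- new max at the end, min unchanged
          rw [if_pos hMx, if_neg hxm, hfmax, hfmin, max_eq_right hMx,
              min_eq_left (le_of_not_gt hxm), hrev,
              PySem.List.index?_cons_self,
              PySem.List.index?_append_of_mem [x] hmmem]
          simp [Prod.ext_iff]
          omega
      · have hxM : x ≠ List.foldl max c s := fun h => hMx (le_of_eq h.symm)
        have hMrev : List.foldl max c s ∈ (c :: s).reverse := by
          exact List.mem_reverse.mpr hMmem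
        obtain ⟨k, hk⟩ := Option.isSome_iff_exists.mp
          ((PySem.List.index?_isSome_iff _ _).mpr hMrev)
        by_cases hxm : x < s.foldl min c
        · -- new min at the end, max unchanged
          have hnotmem : x ∉ c :: s := by
            intro hmem
            rcases List.mem_cons.mp hmem with h | h
            · exact absurd (lt_of_lt_of_le hxm hmle.1) (by rw [h]; exact lt_irrefl c)
            · exact absurd (lt_of_lt_of_le hxm (hmle.2 x h)) (lt_irrefl x)
          rw [if_neg hMx, if_pos hxm, hfmax, hfmin, max_eq_left (le_of_not_ge hMx),
              min_eq_right (le_of_lt hxm), hrev,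
              PySem.List.index?_cons_of_ne _ hxM, hk,
              PySem.List.index?_append_singleton_self (c :: s) x hnotmem]
          simp [Prod.ext_iff]
          omega
        · -- neither extreme changes
          rw [if_neg hMx, if_neg hxm, hfmax, hfmin, max_eq_left (le_of_not_ge hMx),
              min_eq_left (le_of_not_gt hxm), hrev,
              PySem.List.index?_cons_of_ne _ hxM, hk,
              PySem.List.index?_append_of_mem [x] hmmem]
          simp [Prod.ext_iff]
          omega

theorem pv_main (c : Int) (t : List Int) :
    encontrar_extremos (c :: t) = encontrar_extremos_alt (c :: t) := by
  simp only [encontrar_extremos, encontrar_extremos_alt, pv_inv,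
    PySem.List.min?_id_cons, PySem.List.max?_id_cons,
    PySem.List.slice?_none_none_neg_one, Option.getD_some]

-- ===== VERDICT (by name: the statement is the Claim_ definition above) =====
theorem encontrar_extremos_spec : Claim_equal_encontrar_extremos := by
  unfold Claim_equal_encontrar_extremos Spec_encontrar_extremos
  intro l _
  cases l with
  | nil => rfl
  | cons c t => exact pv_main c t
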